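-- pv_equiv track=rewrite | github.com/TajsTheGreat/Tetris | selfmadetetrisAI.py | calculate_unreachable_holes
-- ===== SOURCE A (Python) =====
-- def calculate_unreachable_holes(field, height, width):
--     visited = [[False for _ in range(width)] for _ in range(height)]
--     holes = 0
--
--     for j in range(width):
--         # Start from the top and mark reachable spaces
--         for i in range(height):
--             if field[i][j] > 0:
--                 break
--             visited[i][j] = True
--
--         # Count unreachable holes in the column
--         for i in range(height):
--             if not visited[i][j] and field[i][j] == 0:
--                 holes += 1
--
--     return holes
-- ===== SOURCE B (Python) =====
-- def calculate_unreachable_holes(field, height, width):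
--     # single row-major pass: blocked[j] = "column j already has a filled cell above"
--     blocked = [False] * max(width, 0)
--     holes = 0
--     for i in range(height):
--         for j in range(width):
--             v = field[i][j]
--             if v > 0:
--                 blocked[j] = True
--             elif v == 0 and blocked[j]:
--                 holes += 1
--     return holes
-- ===== Notes on version B (the rewrite author's own statement) =====
-- stated objective: simpler
-- what changed: one row-major pass with a 1D blocked-per-column boolean array replaces A's 2D visited matrix and its two per-column passes (mark-then-count) per column
import Mathlib
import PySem

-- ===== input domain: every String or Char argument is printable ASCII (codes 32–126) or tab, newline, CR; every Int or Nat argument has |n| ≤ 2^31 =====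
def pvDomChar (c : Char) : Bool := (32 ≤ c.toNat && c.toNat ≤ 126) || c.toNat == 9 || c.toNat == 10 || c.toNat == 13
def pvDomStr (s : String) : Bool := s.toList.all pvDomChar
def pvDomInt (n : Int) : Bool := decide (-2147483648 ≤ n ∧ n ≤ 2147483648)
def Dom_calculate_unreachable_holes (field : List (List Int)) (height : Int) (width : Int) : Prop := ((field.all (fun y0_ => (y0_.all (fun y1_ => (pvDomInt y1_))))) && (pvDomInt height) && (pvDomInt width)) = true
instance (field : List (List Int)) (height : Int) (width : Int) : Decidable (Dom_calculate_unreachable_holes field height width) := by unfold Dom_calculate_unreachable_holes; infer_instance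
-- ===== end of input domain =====

-- B replaces A's 2D visited matrix and two per-column passes by one row-major pass
-- over a 1D blocked-per-column array (objective: simpler).

-- ===== PORT A =====
-- field[i][j]; exact under Pre_ (both indices are then nonnegative and in range, so pyGet? = some)
def pvCell (field : List (List Int)) (i j : Nat) : Int :=
  (PySem.List.pyGet? ((PySem.List.pyGet? field (i : Int)).getD []) (j : Int)).getD 0

-- A's inner mark loop for column j: 'for i in range(height): if field[i][j] > 0: break; visited[i][j] = True'
def pvMarkA (f : Nat → Nat → Int) (j : Nat) : List Nat → List (List Bool) → List (List Bool)
  | [], V => V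
  | i :: rest, V =>
      if f i j > 0 then V
      else pvMarkA f j rest (V.set i ((V.getD i []).set j true))

def calculate_unreachable_holes (field : List (List Int)) (height : Int) (width : Int) : Int :=
  let init : List (List Bool) := List.replicate height.toNat (List.replicate width.toNat false)
  ((List.range width.toNat).foldl (fun (st : List (List Bool) × Int) j =>
      let V := pvMarkA (pvCell field) j (List.range height.toNat) st.1
      (V, (List.range height.toNat).foldl (fun h i =>
            if ¬ ((V.getD i []).getD j false) ∧ pvCell field i j = 0 then h + 1 else h) st.2))
    (init, 0)).2

-- ===== PORT B =====
def calculate_unreachable_holes_alt (field : List (List Int)) (height : Int) (width : Int) : Int :=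
  ((List.range height.toNat).foldl (fun (st : List Bool × Int) i =>
      (List.range width.toNat).foldl (fun (st : List Bool × Int) j =>
        let v := pvCell field i j
        if v > 0 then (st.1.set j true, st.2)
        else if v = 0 ∧ st.1.getD j false then (st.1, st.2 + 1)
        else st) st)
    (List.replicate width.toNat false, 0)).2

-- ===== PRECONDITION & SPEC =====
-- Pre_ excludes exactly the inputs where A raises IndexError: when both loops run
-- (0 < width and 0 < height), every accessed row and cell must exist.
def Pre_calculate_unreachable_holes (field : List (List Int)) (height : Int) (width : Int) : Prop :=
  0 < width → 0 < height →
    (height ≤ (field.length : Int) ∧ ∀ r ∈ field.take height.toNat, width ≤ (r.length : Int))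
instance (field : List (List Int)) (height : Int) (width : Int) : Decidable (Pre_calculate_unreachable_holes field height width) := by unfold Pre_calculate_unreachable_holes; infer_instance
def pvWitness_calculate_unreachable_holes : List (List Int) × Int × Int := ([[0,0],[1,0],[0,0]], 3, 2)
def Spec_calculate_unreachable_holes (field : List (List Int)) (height : Int) (width : Int) (out : Int) : Prop := out = calculate_unreachable_holes_alt field height width
instance (field : List (List Int)) (height : Int) (width : Int) (out : Int) : Decidable (Spec_calculate_unreachable_holes field height width out) := by unfold Spec_calculate_unreachable_holes; infer_instance

-- ===== CLAIM (what is proved, stated in full; the proofs are below) =====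
def Claim_equal_calculate_unreachable_holes : Prop := ∀ (field : List (List Int)) (height : Int) (width : Int), Dom_calculate_unreachable_holes field height width → Pre_calculate_unreachable_holes field height width → Spec_calculate_unreachable_holes field height width (calculate_unreachable_holes field height width)

-- ===== LEMMAS AND PROOFS =====

-- "column j has a filled cell among rows < n"
def pvBlk (f : Nat → Nat → Int) (n j : Nat) : Bool := (List.range n).any (fun k => decide (f k j > 0))

-- the cell (i,j) is a covered hole
def pvInd (f : Nat → Nat → Int) (i j : Nat) : Int := if f i j = 0 ∧ pvBlk f i j = true then 1 else 0

-- the mark loop starting at row s with n rows left reaches (and marks) row i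
def pvReach (f : Nat → Nat → Int) (j s n i : Nat) : Bool := decide (s ≤ i ∧ i < s + n ∧ ∀ k, s ≤ k → k ≤ i → ¬ f k j > 0)

def pvGetV (V : List (List Bool)) (i j : Nat) : Bool := (V.getD i []).getD j false

def pvShape (V : List (List Bool)) (H W : Nat) : Prop := V.length = H ∧ ∀ r ∈ V, r.length = W

-- the loop bodies of the two ports, as named functions (definitionally the ports' lambdas)
def pvStepA (f : Nat → Nat → Int) (H : Nat) (st : List (List Bool) × Int) (j : Nat) : List (List Bool) × Int :=
  let V := pvMarkA f j (List.range H) st.1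
  (V, (List.range H).foldl (fun h i =>
        if ¬ ((V.getD i []).getD j false) ∧ f i j = 0 then h + 1 else h) st.2)

def pvFoldA (f : Nat → Nat → Int) (H W n : Nat) : List (List Bool) × Int :=
  (List.range n).foldl (pvStepA f H) (List.replicate H (List.replicate W false), 0)

def pvStepBrow (f : Nat → Nat → Int) (i : Nat) (st : List Bool × Int) (j : Nat) : List Bool × Int :=
  let v := f i j
  if v > 0 then (st.1.set j true, st.2)
  else if v = 0 ∧ st.1.getD j false then (st.1, st.2 + 1)
  else st

def pvFoldB (f : Nat → Nat → Int) (W m : Nat) : List Bool × Int :=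
  (List.range m).foldl (fun (st : List Bool × Int) i => (List.range W).foldl (pvStepBrow f i) st)
    (List.replicate W false, 0)

lemma pvBlk_succ (f : Nat → Nat → Int) (n j : Nat) : pvBlk f (n+1) j = (pvBlk f n j || decide (f n j > 0)) := by
  simp [pvBlk, List.range_succ]

lemma pvGetV_set (V : List (List Bool)) (i j i' j' : Nat) (hi : i < V.length) (hj : j < (V.getD i []).length) :
    pvGetV (V.set i ((V.getD i []).set j true)) i' j' = if i' = i ∧ j' = j then true else pvGetV V i' j' := by
  unfold pvGetV
  simp only [List.getD_eq_getElem?_getD]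
  by_cases h1 : i' = i
  · subst h1
    rw [List.getElem?_set_self (by omega)]
    simp only [Option.getD_some]
    by_cases h2 : j' = j
    · subst h2
      rw [List.getElem?_set_self (by simpa [List.getD_eq_getElem?_getD] using hj)]
      simp
    · rw [List.getElem?_set_ne (by omega)]
      simp [h2]
  · rw [List.getElem?_set_ne (by omega)]
    simp [h1]

lemma pvGetV_replicate (H W i j : Nat) : pvGetV (List.replicate H (List.replicate W false)) i j = false := by
  unfold pvGetV
  simp only [List.getD_eq_getElem?_getD, List.getElem?_replicate]
  split_ifs <;> simp

lemma pvReach_top (f : Nat → Nat → Int) (j H i : Nat) (hi : i < H) :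
    pvReach f j 0 H i = !(pvBlk f (i+1) j) := by
  have hq : (pvBlk f (i+1) j = true) ↔ ∃ k, k ≤ i ∧ f k j > 0 := by
    simp [pvBlk]
  cases hb : pvBlk f (i+1) j with
  | false =>
    simp only [Bool.not_false]
    rw [pvReach, decide_eq_true_eq]
    refine ⟨Nat.zero_le i, by omega, fun k _ hk hpos => ?_⟩
    exact absurd (hq.mpr ⟨k, hk, hpos⟩) (by simp [hb])
  | true =>
    simp only [Bool.not_true]
    rw [pvReach, decide_eq_false_iff_not]
    obtain ⟨k, hk, hpos⟩ := hq.mp hb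
    rintro ⟨-, -, h⟩
    exact h k (Nat.zero_le k) hk hpos

lemma pvCountA (f : Nat → Nat → Int) (j : Nat) (V : List (List Bool)) :
    ∀ (n : Nat) (h : Int), (∀ i < n, pvGetV V i j = !(pvBlk f (i+1) j)) →
      (List.range n).foldl (fun h i => if ¬ ((V.getD i []).getD j false) ∧ f i j = 0 then h + 1 else h) h
        = h + ∑ i ∈ Finset.range n, pvInd f i j := by
  intro n
  induction n with
  | zero => simp
  | succ n ih =>
    intro h hV
    rw [List.range_succ, List.foldl_append, ih h (fun i hi => hV i (by omega)), Finset.sum_range_succ]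
    simp only [List.foldl_cons, List.foldl_nil]
    have hg : (V.getD n []).getD j false = !(pvBlk f (n+1) j) := hV n (by omega)
    rw [hg]
    by_cases hf : f n j = 0
    · by_cases hb : pvBlk f n j = true
      · have : pvBlk f (n+1) j = true := by rw [pvBlk_succ]; simp [hb]
        simp [pvInd, this, hf, hb]
        ring
      · have : pvBlk f (n+1) j = false := by
          rw [pvBlk_succ]; simp [hf, Bool.eq_false_iff.mpr hb]
        simp [pvInd, this, hf, hb]
    · have : ¬ (¬(!pvBlk f (n+1) j) = true ∧ f n j = 0) := by tauto
      simp only [this, if_false]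
      simp [pvInd, hf]

lemma pvMarkA_spec (f : Nat → Nat → Int) (j : Nat) :
    ∀ (n s : Nat) (V : List (List Bool)) (H W : Nat), pvShape V H W → s + n ≤ H → j < W →
      pvShape (pvMarkA f j (List.range' s n) V) H W ∧
      ∀ i' j', pvGetV (pvMarkA f j (List.range' s n) V) i' j' =
        (pvGetV V i' j' || (decide (j' = j) && pvReach f j s n i')) := by
  intro n
  induction n with
  | zero =>
    intro s V H W hV _ _
    refine ⟨hV, fun i' j' => ?_⟩
    have hr : pvReach f j s 0 i' = false := by
      rw [pvReach, decide_eq_false_iff_not]; rintro ⟨h1, h2, -⟩; omega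
    simp [pvMarkA, hr]
  | succ n ih =>
    intro s V H W hV hle hj
    rw [List.range'_succ]
    by_cases hf : f s j > 0
    · rw [show pvMarkA f j (s :: List.range' (s+1) n) V = V by simp [pvMarkA, hf]]
      refine ⟨hV, fun i' j' => ?_⟩
      have hr : pvReach f j s (n+1) i' = false := by
        rw [pvReach, decide_eq_false_iff_not]; rintro ⟨h1, h2, h3⟩
        exact h3 s le_rfl h1 hf
      simp [hr]
    · have hstep : pvMarkA f j (s :: List.range' (s+1) n) V
          = pvMarkA f j (List.range' (s+1) n) (V.set s ((V.getD s []).set j true)) := by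
        simp [pvMarkA, hf]
      rw [hstep]
      have hsH : s < H := by omega
      have hslen : s < V.length := by rw [hV.1]; exact hsH
      have hmem : V.getD s [] ∈ V := by
        rw [List.getD_eq_getElem?_getD, List.getElem?_eq_getElem hslen]
        exact List.getElem_mem _
      have hrow : (V.getD s []).length = W := hV.2 _ hmem
      have hV1 : pvShape (V.set s ((V.getD s []).set j true)) H W := by
        refine ⟨by rw [List.length_set, hV.1], fun r hr => ?_⟩
        rcases List.mem_or_eq_of_mem_set hr with h | h
        · exact hV.2 r h
        · rw [h, List.length_set, hrow]
      obtain ⟨hsh, hget⟩ := ih (s+1) _ H W hV1 (by omega) hj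
      refine ⟨hsh, fun i' j' => ?_⟩
      rw [hget i' j', pvGetV_set V s j i' j' hslen (by rw [hrow]; exact hj)]
      by_cases hj' : j' = j
      · by_cases hi' : i' = s
        · have hr : pvReach f j s (n+1) s = true := by
            rw [pvReach, decide_eq_true_eq]
            exact ⟨le_rfl, by omega, fun k hk1 hk2 => by
              have hk : k = s := by omega
              rw [hk]; exact hf⟩
          simp [hi', hj', hr]
        · have h1 : pvReach f j (s+1) n i' = pvReach f j s (n+1) i' := by
            rw [pvReach, pvReach, decide_eq_decide]
            constructor
            · rintro ⟨a, b, c⟩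
              refine ⟨by omega, by omega, fun k hk1 hk2 => ?_⟩
              rcases Nat.eq_or_lt_of_le hk1 with h | h
              · rw [← h]; exact hf
              · exact c k (by omega) hk2
            · rintro ⟨a, b, c⟩
              exact ⟨by omega, by omega, fun k hk1 hk2 => c k (by omega) hk2⟩
          rw [if_neg (fun hcon : i' = s ∧ j' = j => hi' hcon.1), h1]
      · simp [hj']

lemma pvOuterA (f : Nat → Nat → Int) (H W : Nat) :
    ∀ n, n ≤ W →
      pvShape (pvFoldA f H W n).1 H W ∧
      (∀ i j', n ≤ j' → pvGetV (pvFoldA f H W n).1 i j' = false) ∧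
      (pvFoldA f H W n).2 = ∑ j ∈ Finset.range n, ∑ i ∈ Finset.range H, pvInd f i j := by
  intro n
  induction n with
  | zero =>
    intro _
    refine ⟨⟨by simp [pvFoldA], fun r hr => ?_⟩, fun i j' _ => pvGetV_replicate H W i j', by simp [pvFoldA]⟩
    simp only [pvFoldA, List.range_zero, List.foldl_nil] at hr
    rw [List.eq_of_mem_replicate hr]
    simp
  | succ n ih =>
    intro hn
    obtain ⟨hsh, hcols, hsum⟩ := ih (by omega)
    have hfold : pvFoldA f H W (n+1) = pvStepA f H (pvFoldA f H W n) n := by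
      rw [pvFoldA, List.range_succ, List.foldl_append]
      rfl
    rw [hfold]
    obtain ⟨hsh', hget⟩ := pvMarkA_spec f n H 0 (pvFoldA f H W n).1 H W hsh (by omega) (by omega)
    rw [← List.range_eq_range'] at hsh' hget
    have hV' : (pvStepA f H (pvFoldA f H W n) n).1 = pvMarkA f n (List.range H) (pvFoldA f H W n).1 := rfl
    refine ⟨by rw [hV']; exact hsh', fun i j' hj' => ?_, ?_⟩
    · rw [hV', hget i j', hcols i j' (by omega)]
      have : decide (j' = n) = false := by simp; omega
      simp [this]
    · have hcount : ∀ i < H, pvGetV (pvMarkA f n (List.range H) (pvFoldA f H W n).1) i n = !(pvBlk f (i+1) n) := by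
        intro i hi
        rw [hget i n, hcols i n le_rfl, pvReach_top f n H i hi]
        simp
      have : (pvStepA f H (pvFoldA f H W n) n).2
          = (List.range H).foldl (fun h i =>
              if ¬ ((pvMarkA f n (List.range H) (pvFoldA f H W n).1).getD i []).getD n false ∧ f i n = 0 then h + 1 else h)
            (pvFoldA f H W n).2 := rfl
      rw [this, pvCountA f n _ H _ hcount, hsum, Finset.sum_range_succ]

lemma pvInnerB (f : Nat → Nat → Int) (W i : Nat) :
    ∀ n, n ≤ W → ∀ (b : List Bool) (h : Int), b.length = W → (∀ j, j < W → b.getD j false = pvBlk f i j) →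
      ((List.range n).foldl (pvStepBrow f i) (b, h)).1.length = W ∧
      (∀ j, j < W → ((List.range n).foldl (pvStepBrow f i) (b, h)).1.getD j false
          = if j < n then pvBlk f (i+1) j else pvBlk f i j) ∧
      ((List.range n).foldl (pvStepBrow f i) (b, h)).2 = h + ∑ j ∈ Finset.range n, pvInd f i j := by
  intro n
  induction n with
  | zero =>
    intro _ b h hb hbl
    refine ⟨by simpa using hb, fun j hj => ?_, by simp⟩
    simpa using hbl j hj
  | succ n ih =>
    intro hn b h hb hbl
    obtain ⟨hL, hG, hS⟩ := ih (by omega) b h hb hbl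
    have hfold : (List.range (n+1)).foldl (pvStepBrow f i) (b, h)
        = pvStepBrow f i ((List.range n).foldl (pvStepBrow f i) (b, h)) n := by
      rw [List.range_succ, List.foldl_append]
      rfl
    rw [hfold]
    set Q := (List.range n).foldl (pvStepBrow f i) (b, h) with hQ
    have hGn : Q.1.getD n false = pvBlk f i n := by
      rw [hG n (by omega)]
      simp
    by_cases hv : f i n > 0
    · have hstep : pvStepBrow f i Q n = (Q.1.set n true, Q.2) := by simp [pvStepBrow, hv]
      rw [hstep]
      refine ⟨by rw [List.length_set]; exact hL, fun j hj => ?_, ?_⟩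
      · by_cases hjn : j = n
        · subst hjn
          rw [List.getD_eq_getElem?_getD, List.getElem?_set_self (by omega)]
          rw [pvBlk_succ]
          simp [hv]
        · rw [List.getD_eq_getElem?_getD, List.getElem?_set_ne (by omega), ← List.getD_eq_getElem?_getD, hG j hj]
          have hb1 : pvBlk f (i+1) j = pvBlk f (i+1) j := rfl
          by_cases hjlt : j < n
          · rw [if_pos hjlt, if_pos (by omega)]
          · rw [if_neg hjlt, if_neg (by omega)]
      · rw [hS, Finset.sum_range_succ]
        have : pvInd f i n = 0 := by simp [pvInd]; intro h0; omega
        rw [this]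
        ring
    · by_cases hc : f i n = 0 ∧ Q.1.getD n false = true
      · have hstep : pvStepBrow f i Q n = (Q.1, Q.2 + 1) := by
          simp only [pvStepBrow]
          rw [if_neg hv, if_pos (by exact ⟨hc.1, by rw [hc.2]⟩)]
        rw [hstep]
        have hblk : pvBlk f (i+1) n = pvBlk f i n := by rw [pvBlk_succ]; simp [hv]
        refine ⟨hL, fun j hj => ?_, ?_⟩
        · rw [hG j hj]
          by_cases hjn : j = n
          · subst hjn
            rw [if_neg (by omega), if_pos (by omega), hblk]
          · by_cases hjlt : j < n
            · rw [if_pos hjlt, if_pos (by omega)]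
            · rw [if_neg hjlt, if_neg (by omega)]
        · rw [hS, Finset.sum_range_succ]
          have : pvInd f i n = 1 := by
            have : pvBlk f i n = true := by rw [← hGn]; exact hc.2
            simp [pvInd, hc.1, this]
          rw [this]
          ring
      · have hstep : pvStepBrow f i Q n = Q := by
          simp only [pvStepBrow]
          rw [if_neg hv, if_neg (by intro hcon; exact hc ⟨hcon.1, hcon.2⟩)]
        rw [hstep]
        have hblk : pvBlk f (i+1) n = pvBlk f i n := by rw [pvBlk_succ]; simp [hv]
        refine ⟨hL, fun j hj => ?_, ?_⟩
        · rw [hG j hj]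
          by_cases hjn : j = n
          · subst hjn
            rw [if_neg (by omega), if_pos (by omega), hblk]
          · by_cases hjlt : j < n
            · rw [if_pos hjlt, if_pos (by omega)]
            · rw [if_neg hjlt, if_neg (by omega)]
        · rw [hS, Finset.sum_range_succ]
          have hind : pvInd f i n = 0 := by
            by_cases h0 : f i n = 0
            · have : Q.1.getD n false = false := by
                rcases Bool.eq_false_or_eq_true (Q.1.getD n false) with h | h
                · exact absurd ⟨h0, h⟩ hc
                · exact h
              have hbn : pvBlk f i n = false := by rw [← hGn]; exact this
              simp [pvInd, hbn]
            · simp [pvInd, h0]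
          rw [hind]
          ring

lemma pvOuterB (f : Nat → Nat → Int) (W : Nat) :
    ∀ (m : Nat),
      (pvFoldB f W m).1.length = W ∧
      (∀ j, j < W → (pvFoldB f W m).1.getD j false = pvBlk f m j) ∧
      (pvFoldB f W m).2 = ∑ i ∈ Finset.range m, ∑ j ∈ Finset.range W, pvInd f i j := by
  intro m
  induction m with
  | zero =>
    refine ⟨by simp [pvFoldB], fun j hj => ?_, by simp [pvFoldB]⟩
    simp only [pvFoldB, List.range_zero, List.foldl_nil]
    rw [List.getD_eq_getElem?_getD, List.getElem?_replicate, if_pos hj]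
    simp [pvBlk]
  | succ m ih =>
    obtain ⟨hL, hG, hS⟩ := ih
    have hfold : pvFoldB f W (m+1) = (List.range W).foldl (pvStepBrow f m) (pvFoldB f W m) := by
      rw [pvFoldB, List.range_succ, List.foldl_append]
      rfl
    obtain ⟨hL', hG', hS'⟩ := pvInnerB f W m W le_rfl (pvFoldB f W m).1 (pvFoldB f W m).2 hL hG
    rw [hfold]
    refine ⟨hL', fun j hj => ?_, ?_⟩
    · rw [hG' j hj, if_pos hj]
    · rw [hS', hS, Finset.sum_range_succ]

-- ===== VERDICT (by name: the statement is the Claim_ definition above) =====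
theorem calculate_unreachable_holes_spec : Claim_equal_calculate_unreachable_holes := by
  intro field height width _ _
  unfold Spec_calculate_unreachable_holes
  have hA : calculate_unreachable_holes field height width
      = (pvFoldA (pvCell field) height.toNat width.toNat width.toNat).2 := rfl
  have hB : calculate_unreachable_holes_alt field height width
      = (pvFoldB (pvCell field) width.toNat height.toNat).2 := rfl
  rw [hA, hB, (pvOuterA (pvCell field) height.toNat width.toNat width.toNat le_rfl).2.2,
      (pvOuterB (pvCell field) width.toNat height.toNat).2.2]
  exact (Finset.sum_comm).symm
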